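-- pv_equiv track=rewrite | github.com/ulyana-3107/Studying | LC/n_143.py | reorder_list1
-- ===== SOURCE A (Python) =====
-- def reorder_list1(lst: list) -> list:
--     n = len(lst)
--     if n < 2:
--         return lst
--     new = []
--     for i in range(n//2):
--         j = n - i - 1
--         new.append(lst[i])
--         new.append(lst[j])
--     if n % 2:
--         new.append(lst[n//2])
--     return new
-- ===== SOURCE B (Python) =====
-- def reorder_list1(lst: list) -> list:
--     n = len(lst)
--     if n < 2:
--         return lst
--     res = [None] * n
--     for idx, x in enumerate(lst):
--         if 2 * idx < n:
--             res[2 * idx] = x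
--         else:
--             res[2 * (n - 1 - idx) + 1] = x
--     return res
-- ===== Notes on version B (the rewrite author's own statement) =====
-- stated objective: alternative
-- what changed: Replaces A's loop that appends mirrored pairs (lst[i], lst[n-1-i]) plus a conditional middle append by a one-pass scatter: a result list of length n is preallocated and each element is written once into its computed destination slot (2*idx for the front half, 2*(n-1-idx)+1 for the back half).
import Mathlib
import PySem

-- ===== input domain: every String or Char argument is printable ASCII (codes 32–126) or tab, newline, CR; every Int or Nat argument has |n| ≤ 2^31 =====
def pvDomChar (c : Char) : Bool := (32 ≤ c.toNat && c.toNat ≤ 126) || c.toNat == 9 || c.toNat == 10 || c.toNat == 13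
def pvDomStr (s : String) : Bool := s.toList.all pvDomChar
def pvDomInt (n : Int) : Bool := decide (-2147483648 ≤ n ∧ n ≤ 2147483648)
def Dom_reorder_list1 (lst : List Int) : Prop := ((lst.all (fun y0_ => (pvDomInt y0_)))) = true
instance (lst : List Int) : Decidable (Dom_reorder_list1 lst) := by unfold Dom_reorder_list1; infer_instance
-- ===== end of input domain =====

-- B replaces A's append-pairs loop over mirrored indices by a one-pass scatter: each element is
-- written once into its computed destination slot of a preallocated list (objective: alternative;
-- A never mutates its argument, so only the return value is at issue).

-- ===== PORT A =====
-- literal port of A; the two appends of one iteration become one two-element append.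
-- All indices A reads are provably in range, so pyGetD's default 0 is never returned.
def reorder_list1 (lst : List Int) : List Int :=
  let n : Int := lst.length
  if n < 2 then lst
  else
    let new := (PySem.List.pyRange 0 (PySem.Int.floordiv n 2) 1).foldl
      (fun acc i => acc ++ [PySem.List.pyGetD lst i 0,
                            PySem.List.pyGetD lst (n - i - 1) 0]) ([] : List Int)
    if PySem.Int.mod n 2 ≠ 0 then new ++ [PySem.List.pyGetD lst (PySem.Int.floordiv n 2) 0]
    else new

-- ===== PORT B =====
-- literal port of Source B: `[None] * n` becomes `List.replicate n 0` (every slot is overwritten,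
-- see the proofs, so the placeholder value never appears in the result); `for idx, x in
-- enumerate(lst)` is a foldl over `lst.zipIdx` (pairs (x, idx)); `res[t] = x` is `res.set t x`.
-- All index arithmetic is on nonnegative ints, so Nat arithmetic is exact here.
def reorder_list1_alt (lst : List Int) : List Int :=
  let n := lst.length
  if n < 2 then lst
  else
    lst.zipIdx.foldl
      (fun res p =>
        if 2 * p.2 < n then res.set (2 * p.2) p.1
        else res.set (2 * (n - 1 - p.2) + 1) p.1)
      (List.replicate n 0)

-- ===== PRECONDITION & SPEC =====
def Spec_reorder_list1 (lst : List Int) (out : List Int) : Prop := out = reorder_list1_alt lst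
instance (lst : List Int) (out : List Int) : Decidable (Spec_reorder_list1 lst out) := by unfold Spec_reorder_list1; infer_instance

-- ===== CLAIM (what is proved, stated in full; the proofs are below) =====
def Claim_equal_reorder_list1 : Prop := ∀ (lst : List Int), Dom_reorder_list1 lst → Spec_reorder_list1 lst (reorder_list1 lst)

-- ===== LEMMAS AND PROOFS =====

-- destination slot of source index k (B's scatter target) and its inverse
def pvTgt (n k : Nat) : Nat := if 2 * k < n then 2 * k else 2 * (n - 1 - k) + 1
def pvInv (n j : Nat) : Nat := if j % 2 = 0 then j / 2 else n - 1 - j / 2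

theorem pvInv_lt {n j : Nat} (hn : 2 ≤ n) (hj : j < n) : pvInv n j < n := by
  unfold pvInv; split <;> omega

theorem pvTgt_inv {n j : Nat} (hj : j < n) : pvTgt n (pvInv n j) = j := by
  unfold pvTgt pvInv; split <;> split <;> omega

-- zipIdx written as a map over the index range
theorem zipIdx_eq_map_range (l : List Int) : ∀ s : Nat,
    l.zipIdx s = (List.range l.length).map (fun i => (l.getD i 0, s + i)) := by
  induction l with
  | nil => intro s; simp
  | cons x t ih =>
    intro s
    simp only [List.zipIdx_cons, List.length_cons, List.range_succ_eq_map, List.map_cons,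
      List.map_map, List.getD_cons_zero, Nat.add_zero, ih (s + 1)]
    refine congrArg _ ?_
    apply List.map_congr_left
    intro i _
    simp
    omega

-- the scatter step, written with pvTgt
theorem step_eq_set (n : Nat) (r : List Int) (v : Int) (k : Nat) :
    (if 2 * k < n then r.set (2 * k) v else r.set (2 * (n - 1 - k) + 1) v)
      = r.set (pvTgt n k) v := by
  unfold pvTgt; split <;> rfl

-- the scatter fold preserves the length
theorem scatter_length (lst : List Int) (r0 : List Int) : ∀ m : Nat,
    (((List.range m).foldl (fun r k => r.set (pvTgt lst.length k) (lst.getD k 0)) r0)).length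
      = r0.length := by
  intro m
  induction m with
  | zero => simp
  | succ m ih =>
    rw [List.range_succ, List.foldl_append]
    simp only [List.foldl_cons, List.foldl_nil, List.length_set]
    exact ih

-- pointwise value of the scatter fold
theorem scatter_getD (lst : List Int) (r0 : List Int) (hr : r0.length = lst.length)
    (j : Nat) (hj : j < lst.length) : ∀ m : Nat, m ≤ lst.length →
    (((List.range m).foldl (fun r k => r.set (pvTgt lst.length k) (lst.getD k 0)) r0)).getD j 0
      = if pvInv lst.length j < m then lst.getD (pvInv lst.length j) 0 else r0.getD j 0 := by
  intro m
  induction m with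
  | zero => simp
  | succ m ih =>
    intro hm
    rw [List.range_succ, List.foldl_append]
    simp only [List.foldl_cons, List.foldl_nil]
    set F := (List.range m).foldl (fun r k => r.set (pvTgt lst.length k) (lst.getD k 0)) r0
      with hF
    have hFlen : F.length = lst.length := by rw [hF, scatter_length, hr]
    by_cases he : pvTgt lst.length m = j
    · have hinv : pvInv lst.length j = m := by
        subst he
        unfold pvTgt pvInv; split <;> split <;> omega
      rw [List.getD_eq_getElem?_getD, he, List.getElem?_set_self (by omega)]
      simp [hinv]
    · rw [List.getD_eq_getElem?_getD, List.getElem?_set_ne he, ← List.getD_eq_getElem?_getD,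
        ih (by omega)]
      have hne : pvInv lst.length j ≠ m := by
        intro h
        exact he (by rw [← h, pvTgt_inv hj])
      by_cases hlt : pvInv lst.length j < m
      · rw [if_pos hlt, if_pos (show pvInv lst.length j < m + 1 by omega)]
      · rw [if_neg hlt, if_neg (show ¬ pvInv lst.length j < m + 1 by omega)]

-- pairs-of-two flatMap over half the range = map over the full range
theorem flatMap_pair (g : Nat → Int) : ∀ H : Nat,
    (List.range H).flatMap (fun k => [g (2 * k), g (2 * k + 1)]) = (List.range (2 * H)).map g := by
  intro H
  induction H with
  | zero => simp
  | succ H ih =>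
    rw [List.range_succ, List.flatMap_append, ih]
    have h2 : 2 * (H + 1) = (2 * H + 1) + 1 := by ring
    rw [h2, List.range_succ, List.range_succ]
    simp

-- A's result as a map over the index range
theorem portA_eq_map (lst : List Int) (hn : ¬ ((lst.length : Int) < 2)) :
    reorder_list1 lst
      = (List.range lst.length).map (fun j => lst.getD (pvInv lst.length j) 0) := by
  unfold reorder_list1
  simp only [hn, if_false]
  have hlen : 2 ≤ lst.length := by exact_mod_cast not_lt.mp hn
  set N := lst.length with hN
  have hfd : PySem.Int.floordiv (N : Int) 2 = ((N / 2 : Nat) : Int) := by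
    exact_mod_cast PySem.Int.floordiv_natCast N 2
  have hmod : PySem.Int.mod (N : Int) 2 = ((N % 2 : Nat) : Int) := by
    exact_mod_cast PySem.Int.mod_natCast N 2
  rw [hfd, hmod]
  set H := N / 2 with hH
  rw [PySem.List.pyRange_one 0 ((H : Nat) : Int)]
  simp only [sub_zero, Int.toNat_natCast, zero_add]
  rw [List.foldl_map, PySem.List.foldl_append_eq_flatMap]
  simp only [List.nil_append]
  have hbody : (List.range H).flatMap
        (fun k => [PySem.List.pyGetD lst ((k : Nat) : Int) 0,
                   PySem.List.pyGetD lst ((N : Int) - ((k : Nat) : Int) - 1) 0])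
      = (List.range H).flatMap
        (fun k => [lst.getD (pvInv N (2 * k)) 0, lst.getD (pvInv N (2 * k + 1)) 0]) := by
    apply List.flatMap_congr
    intro k hk
    rw [List.mem_range] at hk
    have e1 : PySem.List.pyGetD lst ((k : Nat) : Int) 0 = lst.getD k 0 :=
      PySem.List.pyGetD_natCast lst k 0
    have e2 : ((N : Int) - ((k : Nat) : Int) - 1) = ((N - 1 - k : Nat) : Int) := by
      push_cast [hN]; omega
    have e3 : PySem.List.pyGetD lst ((N : Int) - ((k : Nat) : Int) - 1) 0
        = lst.getD (N - 1 - k) 0 := by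
      rw [e2]; exact PySem.List.pyGetD_natCast lst _ 0
    have i1 : pvInv N (2 * k) = k := by unfold pvInv; split <;> omega
    have i2 : pvInv N (2 * k + 1) = N - 1 - k := by unfold pvInv; split <;> omega
    rw [e1, e3, i1, i2]
  rw [hbody, flatMap_pair (fun j => lst.getD (pvInv N j) 0) H]
  by_cases hodd : N % 2 = 0
  · have c1 : ¬ (((N % 2 : Nat) : Int) ≠ 0) := by simp [hodd]
    have hNH : 2 * H = N := by omega
    simp only [c1, if_false, hNH]
  · have c1 : (((N % 2 : Nat) : Int) ≠ 0) := by
      simp only [ne_eq, Int.natCast_eq_zero]; omega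
    have hNH : N = 2 * H + 1 := by omega
    rw [if_pos c1]
    have eM : PySem.List.pyGetD lst ((H : Nat) : Int) 0 = lst.getD H 0 :=
      PySem.List.pyGetD_natCast lst H 0
    have iM : pvInv N (2 * H) = H := by unfold pvInv; split <;> omega
    have hr : List.range N = List.range (2 * H) ++ [2 * H] := by
      rw [hNH, List.range_succ]
    rw [hr, List.map_append]
    simp [eM, iM]

-- B's result as the scatter fold over the index range
theorem portB_eq_fold (lst : List Int) (hn : ¬ (lst.length < 2)) :
    reorder_list1_alt lst
      = (List.range lst.length).foldl
          (fun r k => r.set (pvTgt lst.length k) (lst.getD k 0))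
          (List.replicate lst.length 0) := by
  unfold reorder_list1_alt
  simp only [hn, if_false]
  rw [zipIdx_eq_map_range lst 0, List.foldl_map]
  apply PySem.List.foldl_congr_mem
  intro r p _
  simp only [Nat.zero_add]
  exact step_eq_set lst.length r (lst.getD p 0) p

-- ===== VERDICT (by name: the statement is the Claim_ definition above) =====
theorem reorder_list1_spec : Claim_equal_reorder_list1 := by
  intro lst _
  unfold Spec_reorder_list1
  by_cases hn : (lst.length : Int) < 2
  · have hn' : lst.length < 2 := by exact_mod_cast hn
    unfold reorder_list1 reorder_list1_alt
    simp [hn, hn']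
  · have hn' : ¬ (lst.length < 2) := by
      intro h; exact hn (by exact_mod_cast h)
    have hlen : 2 ≤ lst.length := by omega
    rw [portA_eq_map lst hn, portB_eq_fold lst hn']
    apply List.ext_getElem
    · rw [scatter_length]; simp
    · intro j h1 h2
      have hj : j < lst.length := by simpa using h1
      have hBlen : ((List.range lst.length).foldl
          (fun r k => r.set (pvTgt lst.length k) (lst.getD k 0))
          (List.replicate lst.length 0)).length = lst.length := by
        rw [scatter_length]; simp
      rw [← List.getD_eq_getElem _ 0 h1, ← List.getD_eq_getElem _ 0 h2]
      rw [scatter_getD lst _ (by simp) j hj lst.length le_rfl]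
      rw [if_pos (pvInv_lt hlen hj)]
      rw [List.getD_eq_getElem _ 0 h1]
      simp only [List.getElem_map, List.getElem_range]
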